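-- pv_equiv track=rewrite | github.com/21wh1a0501/CROSSWORD | root.py | down1
-- ===== SOURCE A (Python) =====
-- def down1(r, c, puzzle, copy):
--     down_clues = []
--     for i in range(r):
--         for j in range(c):
--             if puzzle[i][j] == '*' or copy[i][j] == 0:
--                 continue
--             clue_number = copy[i][j]
--             clue_text = ''
--             k = i
--             while k < r and puzzle[k][j] != '*':
--                 clue_text += puzzle[k][j]
--                 copy[k][j] = 0
--                 k += 1
--             down_clues.append((clue_number, clue_text))
--     return down_clues
-- ===== SOURCE B (Python) =====
-- def down1(r, c, puzzle, copy):
--     # Pure re-implementation: instead of consuming cells by zeroing `copy` in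
--     # place, detect non-start cells with an upward scan and recompute each
--     # clue text directly.  (A mutates `copy`; B leaves it untouched.)
--     out = []
--     for i in range(r):
--         for j in range(c):
--             if puzzle[i][j] == '*' or copy[i][j] == 0:
--                 continue
--             k = i - 1
--             while k >= 0 and puzzle[k][j] != '*' and copy[k][j] == 0:
--                 k -= 1
--             if k >= 0 and puzzle[k][j] != '*':
--                 continue  # consumed by a clue starting higher up
--             text = ''
--             t = i
--             while t < r and puzzle[t][j] != '*':
--                 text += puzzle[t][j]
--                 t += 1
--             out.append((copy[i][j], text))
--     return out
-- ===== Notes on version B (the rewrite author's own statement) =====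
-- stated objective: alternative
-- what changed: B is pure: instead of marking consumed cells by zeroing the copy grid in place while walking each clue, it decides per cell with an upward scan whether a clue starting higher up already covers it, and recomputes each clue text directly (A mutates its copy argument, B does not).
import Mathlib
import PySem

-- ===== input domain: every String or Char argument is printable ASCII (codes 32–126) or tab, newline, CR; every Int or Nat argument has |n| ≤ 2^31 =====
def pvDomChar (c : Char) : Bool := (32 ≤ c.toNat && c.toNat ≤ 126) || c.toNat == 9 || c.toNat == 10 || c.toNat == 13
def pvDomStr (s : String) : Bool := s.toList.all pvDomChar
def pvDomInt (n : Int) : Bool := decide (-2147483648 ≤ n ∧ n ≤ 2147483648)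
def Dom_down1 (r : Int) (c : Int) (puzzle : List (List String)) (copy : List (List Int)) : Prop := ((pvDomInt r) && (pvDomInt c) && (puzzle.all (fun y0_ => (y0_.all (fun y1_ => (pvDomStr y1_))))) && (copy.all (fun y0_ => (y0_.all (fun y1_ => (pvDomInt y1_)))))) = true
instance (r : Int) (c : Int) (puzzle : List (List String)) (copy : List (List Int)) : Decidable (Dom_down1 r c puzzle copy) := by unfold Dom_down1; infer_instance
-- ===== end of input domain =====

-- B replaces A's in-place zeroing of `copy` (which marks cells as consumed) by a pure upward
-- "is this cell consumed by a clue starting higher up?" scan; equivalence is about the RETURN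
-- value only — A mutates its `copy` argument, B does not.

-- ===== PORT A =====
-- grid accessors; out-of-range access raises IndexError in Python and is excluded by Pre_down1,
-- so the `getD` defaults are never observed inside the claim
def pvGetS (puzzle : List (List String)) (i j : Nat) : String := (puzzle.getD i []).getD j ""
def pvGetZ (m : List (List Int)) (i j : Nat) : Int := (m.getD i []).getD j 0
def pvSetZ (m : List (List Int)) (i j : Nat) : List (List Int) := m.set i ((m.getD i []).set j 0)

-- the `while k < r and puzzle[k][j] != '*'` walk of A; fuel = r - k encodes the `k < r` bound
def aWalk (puzzle : List (List String)) (j : Nat) : Nat → Nat → List (List Int) → String → List (List Int) × String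
  | _, 0, cp, t => (cp, t)
  | k, f+1, cp, t =>
    if pvGetS puzzle k j = "*" then (cp, t)
    else aWalk puzzle j (k+1) f (pvSetZ cp k j) (t ++ pvGetS puzzle k j)

-- inner `for j in range(c)` of A; state = (copy, down_clues)
def aLoopJ (puzzle : List (List String)) (R i : Nat) : Nat → Nat → List (List Int) × List (Int × String) → List (List Int) × List (Int × String)
  | _, 0, st => st
  | j, fj+1, (cp, acc) =>
    if pvGetS puzzle i j = "*" ∨ pvGetZ cp i j = 0 then aLoopJ puzzle R i (j+1) fj (cp, acc)
    else
      let w := aWalk puzzle j i (R - i) cp ""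
      aLoopJ puzzle R i (j+1) fj (w.1, acc ++ [(pvGetZ cp i j, w.2)])

-- outer `for i in range(r)` of A
def aLoopI (puzzle : List (List String)) (R C : Nat) : Nat → Nat → List (List Int) × List (Int × String) → List (List Int) × List (Int × String)
  | _, 0, st => st
  | i, fi+1, st => aLoopI puzzle R C (i+1) fi (aLoopJ puzzle R i 0 C st)

def down1 (r : Int) (c : Int) (puzzle : List (List String)) (copy : List (List Int)) : List (Int × String) :=
  (aLoopI puzzle r.toNat c.toNat 0 r.toNat (copy, [])).2

-- ===== PORT B =====
-- B's upward scan `k = i-1; while k >= 0 and puzzle[k][j] != '*' and copy[k][j] == 0: k -= 1;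
-- consumed iff k >= 0 and puzzle[k][j] != '*'`; argument counts the rows above
def bScan (puzzle : List (List String)) (copy : List (List Int)) (j : Nat) : Nat → Bool
  | 0 => false
  | k+1 =>
    if pvGetS puzzle k j = "*" then false
    else if pvGetZ copy k j = 0 then bScan puzzle copy j k
    else true

-- B's pure text walk `while t < r and puzzle[t][j] != '*'`
def bText (puzzle : List (List String)) (j : Nat) : Nat → Nat → String → String
  | _, 0, t => t
  | k, f+1, t =>
    if pvGetS puzzle k j = "*" then t
    else bText puzzle j (k+1) f (t ++ pvGetS puzzle k j)

def bLoopJ (puzzle : List (List String)) (copy : List (List Int)) (R i : Nat) : Nat → Nat → List (Int × String) → List (Int × String)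
  | _, 0, acc => acc
  | j, fj+1, acc =>
    if pvGetS puzzle i j = "*" ∨ pvGetZ copy i j = 0 then bLoopJ puzzle copy R i (j+1) fj acc
    else if bScan puzzle copy j i then bLoopJ puzzle copy R i (j+1) fj acc
    else bLoopJ puzzle copy R i (j+1) fj (acc ++ [(pvGetZ copy i j, bText puzzle j i (R - i) "")])

def bLoopI (puzzle : List (List String)) (copy : List (List Int)) (R C : Nat) : Nat → Nat → List (Int × String) → List (Int × String)
  | _, 0, acc => acc
  | i, fi+1, acc => bLoopI puzzle copy R C (i+1) fi (bLoopJ puzzle copy R i 0 C acc)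

def down1_alt (r : Int) (c : Int) (puzzle : List (List String)) (copy : List (List Int)) : List (Int × String) :=
  bLoopI puzzle copy r.toNat c.toNat 0 r.toNat []

-- ===== PRECONDITION & SPEC =====
-- exactly the inputs on which Python A returns (no IndexError): when c > 0, every row index i < r
-- reaches a puzzle row of length ≥ c, and every non-'*' cell among the first r×c cells has a
-- corresponding copy cell (copy[i][j] is only touched after the '*' test short-circuits)
def Pre_down1 (r : Int) (c : Int) (puzzle : List (List String)) (copy : List (List Int)) : Prop :=
  0 < c →
    (r.toNat ≤ puzzle.length ∧
      ∀ i < r.toNat, c.toNat ≤ (puzzle.getD i []).length ∧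
        ∀ j < c.toNat, pvGetS puzzle i j ≠ "*" → i < copy.length ∧ j < (copy.getD i []).length)
instance (r : Int) (c : Int) (puzzle : List (List String)) (copy : List (List Int)) : Decidable (Pre_down1 r c puzzle copy) := by unfold Pre_down1; infer_instance
def pvWitness_down1 : Int × Int × List (List String) × List (List Int) :=
  (2, 2, [["a", "*"], ["b", "c"]], [[1, 0], [0, 2]])

def Spec_down1 (r : Int) (c : Int) (puzzle : List (List String)) (copy : List (List Int)) (out : List (Int × String)) : Prop := out = down1_alt r c puzzle copy
instance (r : Int) (c : Int) (puzzle : List (List String)) (copy : List (List Int)) (out : List (Int × String)) : Decidable (Spec_down1 r c puzzle copy out) := by unfold Spec_down1; infer_instance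

-- ===== CLAIM (what is proved, stated in full; the proofs are below) =====
def Claim_equal_down1 : Prop := ∀ (r : Int) (c : Int) (puzzle : List (List String)) (copy : List (List Int)), Dom_down1 r c puzzle copy → Pre_down1 r c puzzle copy → Spec_down1 r c puzzle copy (down1 r c puzzle copy)

-- ===== LEMMAS AND PROOFS =====

-- no wall in column j between rows s and p (inclusive)
def pvNoWall (puzzle : List (List String)) (j s p : Nat) : Prop :=
  ∀ k, s ≤ k → k ≤ p → pvGetS puzzle k j ≠ "*"

-- cell (p,q) has been zeroed by A once all cells row-major-before (i,j) are processed: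
-- some row s at or above p, already processed, holds a nonzero clue number with no wall down to p
def pvZeroed (puzzle : List (List String)) (copy : List (List Int)) (i j p q : Nat) : Prop :=
  ∃ s, (s < i ∨ (s = i ∧ q < j)) ∧ s ≤ p ∧ pvGetZ copy s q ≠ 0 ∧ pvNoWall puzzle q s p

def pvShape (copy cp : List (List Int)) : Prop :=
  cp.length = copy.length ∧ ∀ p, (cp.getD p []).length = (copy.getD p []).length

-- in-range condition for the copy cells A actually touches
def pvHP (puzzle : List (List String)) (copy : List (List Int)) (R C : Nat) : Prop :=
  ∀ i, i < R → ∀ j, j < C → pvGetS puzzle i j ≠ "*" → i < copy.length ∧ j < (copy.getD i []).length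

-- loop invariant: cp is the original copy with zeros exactly at the pvZeroed cells
def pvInv (puzzle : List (List String)) (copy : List (List Int)) (R C i j : Nat) (cp : List (List Int)) : Prop :=
  pvShape copy cp ∧ ∀ p, p < R → ∀ q, q < C →
    (pvZeroed puzzle copy i j p q → pvGetZ cp p q = 0) ∧
    (¬ pvZeroed puzzle copy i j p q → pvGetZ cp p q = pvGetZ copy p q)

theorem pvGetD_set_ne {α : Type} (l : List α) (i p : Nat) (a d : α) (h : i ≠ p) :
    (l.set i a).getD p d = l.getD p d := by
  simp [List.getD_eq_getElem?_getD, List.getElem?_set_ne h]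

theorem pvGetD_set_self {α : Type} (l : List α) (i : Nat) (a d : α) (h : i < l.length) :
    (l.set i a).getD i d = a := by
  simp [List.getD_eq_getElem?_getD, h]

theorem pvGetZ_setZ_ne (m : List (List Int)) (i j p q : Nat) (h : p ≠ i ∨ q ≠ j) :
    pvGetZ (pvSetZ m i j) p q = pvGetZ m p q := by
  unfold pvGetZ pvSetZ
  rcases h with h | h
  · rw [pvGetD_set_ne _ _ _ _ _ (fun hc => h hc.symm)]
  · by_cases hp : p = i
    · subst hp
      by_cases hlen : p < m.length
      · rw [pvGetD_set_self _ _ _ _ hlen, pvGetD_set_ne _ _ _ _ _ (fun hc => h hc.symm)]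
      · rw [List.set_eq_of_length_le (by omega)]
    · rw [pvGetD_set_ne _ _ _ _ _ (fun hc => hp hc.symm)]

theorem pvGetZ_setZ_self (m : List (List Int)) (i j : Nat)
    (hi : i < m.length) (hj : j < (m.getD i []).length) :
    pvGetZ (pvSetZ m i j) i j = 0 := by
  unfold pvGetZ pvSetZ
  rw [pvGetD_set_self _ _ _ _ hi, pvGetD_set_self _ _ _ _ hj]

theorem pvShape_setZ (copy cp : List (List Int)) (i j : Nat) (h : pvShape copy cp) :
    pvShape copy (pvSetZ cp i j) := by
  obtain ⟨h1, h2⟩ := h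
  refine ⟨by simpa [pvSetZ] using h1, fun p => ?_⟩
  by_cases hp : p = i
  · subst hp
    by_cases hlen : p < cp.length
    · rw [pvSetZ, pvGetD_set_self _ _ _ _ hlen, List.length_set]; exact h2 p
    · rw [pvSetZ, List.set_eq_of_length_le (by omega)]; exact h2 p
  · rw [pvSetZ, pvGetD_set_ne _ _ _ _ _ (fun hc => hp hc.symm)]; exact h2 p

theorem aWalk_snd (puzzle : List (List String)) (j : Nat) :
    ∀ f k cp t, (aWalk puzzle j k f cp t).2 = bText puzzle j k f t := by
  intro f
  induction f with
  | zero => intro k cp t; simp [aWalk, bText]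
  | succ f ih =>
    intro k cp t
    simp only [aWalk, bText]
    split
    · rfl
    · exact ih _ _ _

theorem aWalk_fst_shape (puzzle : List (List String)) (copy : List (List Int)) (j : Nat) :
    ∀ f k cp t, pvShape copy cp → pvShape copy (aWalk puzzle j k f cp t).1 := by
  intro f
  induction f with
  | zero => intro k cp t h; simpa [aWalk] using h
  | succ f ih =>
    intro k cp t h
    simp only [aWalk]
    split
    · exact h
    · exact ih _ _ _ (pvShape_setZ _ _ _ _ h)

theorem aWalk_fst_keep (puzzle : List (List String)) (j : Nat) :
    ∀ f k cp t p q, ¬ (q = j ∧ k ≤ p ∧ p < k + f ∧ pvNoWall puzzle j k p) →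
      pvGetZ (aWalk puzzle j k f cp t).1 p q = pvGetZ cp p q := by
  intro f
  induction f with
  | zero => intro k cp t p q _; simp [aWalk]
  | succ f ih =>
    intro k cp t p q hnc
    simp only [aWalk]
    split
    · rfl
    · rename_i hw
      have hcond' : ¬ (q = j ∧ k + 1 ≤ p ∧ p < (k + 1) + f ∧ pvNoWall puzzle j (k + 1) p) := by
        rintro ⟨hq, h1, h2, h3⟩
        refine hnc ⟨hq, by omega, by omega, fun k' hk1 hk2 => ?_⟩
        rcases Nat.eq_or_lt_of_le hk1 with he | hl
        · rw [← he]; exact hw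
        · exact h3 k' hl hk2
      have hne : p ≠ k ∨ q ≠ j := by
        by_cases hp : p = k
        · refine Or.inr (fun hq => hnc ⟨hq, by omega, by omega, fun k' hk1 hk2 => ?_⟩)
          have hkk : k' = k := by omega
          rw [hkk]; exact hw
        · exact Or.inl hp
      rw [ih (k + 1) (pvSetZ cp k j) (t ++ pvGetS puzzle k j) p q hcond',
        pvGetZ_setZ_ne cp k j p q hne]

theorem aWalk_fst_zero (puzzle : List (List String)) (copy : List (List Int)) (R C j : Nat)
    (hHP : pvHP puzzle copy R C) (hjC : j < C) :
    ∀ f k cp t p, pvShape copy cp → k + f ≤ R → k ≤ p → p < k + f → pvNoWall puzzle j k p →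
      pvGetZ (aWalk puzzle j k f cp t).1 p j = 0 := by
  intro f
  induction f with
  | zero => intro k cp t p _ _ _ hlt _; omega
  | succ f ih =>
    intro k cp t p hsh hR hkp hpf hnw
    have hw : pvGetS puzzle k j ≠ "*" := hnw k (le_refl _) hkp
    simp only [aWalk, if_neg hw]
    by_cases hp : p = k
    · subst hp
      rw [aWalk_fst_keep puzzle j f (p + 1) (pvSetZ cp p j) (t ++ pvGetS puzzle p j) p j
        (by rintro ⟨_, h1, _, _⟩; omega)]
      have hrng := hHP p (by omega) j hjC hw
      have hlen := hsh.1
      have hrow := hsh.2 p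
      exact pvGetZ_setZ_self cp p j (by omega) (by omega)
    · exact ih (k + 1) (pvSetZ cp k j) (t ++ pvGetS puzzle k j) p
        (pvShape_setZ copy cp k j hsh) (by omega) (by omega) (by omega)
        (fun k' h1 h2 => hnw k' (by omega) h2)

theorem bScan_iff (puzzle : List (List String)) (copy : List (List Int)) (j : Nat) :
    ∀ i, bScan puzzle copy j i = true ↔
      ∃ s, s < i ∧ pvGetZ copy s j ≠ 0 ∧ ∀ k, s ≤ k → k < i → pvGetS puzzle k j ≠ "*" := by
  intro i
  induction i with
  | zero => simp [bScan]
  | succ i ih =>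
    simp only [bScan]
    by_cases hw : pvGetS puzzle i j = "*"
    · rw [if_pos hw]
      constructor
      · intro h; cases h
      · rintro ⟨s, hs, _, hnw⟩
        exact absurd hw (hnw i (by omega) (by omega))
    · rw [if_neg hw]
      by_cases hz : pvGetZ copy i j = 0
      · rw [if_pos hz, ih]
        constructor
        · rintro ⟨s, hs, hnz, hnw⟩
          refine ⟨s, by omega, hnz, fun k h1 h2 => ?_⟩
          rcases Nat.lt_or_ge k i with h | h
          · exact hnw k h1 h
          · have hki : k = i := by omega
            subst hki; exact hw
        · rintro ⟨s, hs, hnz, hnw⟩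
          refine ⟨s, ?_, hnz, fun k h1 h2 => hnw k h1 (by omega)⟩
          rcases Nat.lt_or_ge s i with h | h
          · exact h
          · have hsi : s = i := by omega
            rw [hsi] at hnz; exact absurd hz hnz
      · rw [if_neg hz]
        constructor
        · intro _
          refine ⟨i, by omega, hz, fun k h1 h2 => ?_⟩
          have hki : k = i := by omega
          subst hki; exact hw
        · intro _; rfl

-- pvZeroed transfer lemmas
theorem pvZeroed_wall (puzzle : List (List String)) (copy : List (List Int)) (i j p q : Nat)
    (hw : q = j → pvGetS puzzle i j = "*") :
    (pvZeroed puzzle copy i (j+1) p q ↔ pvZeroed puzzle copy i j p q) := by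
  constructor
  · rintro ⟨s, hs, h1, h2, h3⟩
    rcases hs with hs | ⟨hs, hq⟩
    · exact ⟨s, Or.inl hs, h1, h2, h3⟩
    · by_cases hqj : q = j
      · have hcontra := h3 s le_rfl h1
        rw [hs, hqj] at hcontra
        exact absurd (hw hqj) hcontra
      · exact ⟨s, Or.inr ⟨hs, by omega⟩, h1, h2, h3⟩
  · rintro ⟨s, hs, h1, h2, h3⟩
    exact ⟨s, by omega, h1, h2, h3⟩

theorem pvZeroed_zero (puzzle : List (List String)) (copy : List (List Int)) (i j p q : Nat)
    (hz : pvGetZ copy i j = 0) :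
    (pvZeroed puzzle copy i (j+1) p q ↔ pvZeroed puzzle copy i j p q) := by
  constructor
  · rintro ⟨s, hs, h1, h2, h3⟩
    rcases hs with hs | ⟨hs, hq⟩
    · exact ⟨s, Or.inl hs, h1, h2, h3⟩
    · by_cases hqj : q = j
      · rw [hs, hqj] at h2; exact absurd hz h2
      · exact ⟨s, Or.inr ⟨hs, by omega⟩, h1, h2, h3⟩
  · rintro ⟨s, hs, h1, h2, h3⟩
    exact ⟨s, by omega, h1, h2, h3⟩

theorem pvZeroed_consumed (puzzle : List (List String)) (copy : List (List Int)) (i j p q : Nat)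
    (hc : pvZeroed puzzle copy i j i j) :
    (pvZeroed puzzle copy i (j+1) p q ↔ pvZeroed puzzle copy i j p q) := by
  constructor
  · rintro ⟨s, hs, h1, h2, h3⟩
    rcases hs with hs | ⟨hs, hq⟩
    · exact ⟨s, Or.inl hs, h1, h2, h3⟩
    · by_cases hqj : q = j
      · obtain ⟨s', hs', hs'i, hnz', hnw'⟩ := hc
        rcases hs' with hs' | ⟨_, hq'⟩
        · subst hqj
          refine ⟨s', Or.inl hs', by omega, hnz', fun k hk1 hk2 => ?_⟩
          rcases Nat.le_total k i with h | h
          · exact hnw' k hk1 h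
          · exact h3 k (by omega) hk2
        · omega
      · exact ⟨s, Or.inr ⟨hs, by omega⟩, h1, h2, h3⟩
  · rintro ⟨s, hs, h1, h2, h3⟩
    exact ⟨s, by omega, h1, h2, h3⟩

theorem pvZeroed_start (puzzle : List (List String)) (copy : List (List Int)) (i j p q : Nat)
    (hnz : pvGetZ copy i j ≠ 0) :
    (pvZeroed puzzle copy i (j+1) p q ↔
      pvZeroed puzzle copy i j p q ∨ (q = j ∧ i ≤ p ∧ pvNoWall puzzle j i p)) := by
  constructor
  · rintro ⟨s, hs, h1, h2, h3⟩
    rcases hs with hs | ⟨hs, hq⟩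
    · exact Or.inl ⟨s, Or.inl hs, h1, h2, h3⟩
    · by_cases hqj : q = j
      · subst hs; subst hqj; exact Or.inr ⟨rfl, h1, h3⟩
      · exact Or.inl ⟨s, Or.inr ⟨hs, by omega⟩, h1, h2, h3⟩
  · rintro (⟨s, hs, h1, h2, h3⟩ | ⟨hq, hip, hnw⟩)
    · exact ⟨s, by omega, h1, h2, h3⟩
    · subst hq; exact ⟨i, Or.inr ⟨rfl, by omega⟩, hip, hnz, hnw⟩

theorem pvZeroed_nextRow (puzzle : List (List String)) (copy : List (List Int)) (i C p q : Nat)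
    (hq : q < C) :
    (pvZeroed puzzle copy (i+1) 0 p q ↔ pvZeroed puzzle copy i C p q) := by
  constructor
  · rintro ⟨s, hs, h1, h2, h3⟩
    rcases hs with hs | ⟨_, hq0⟩
    · rcases Nat.lt_or_ge s i with h | h
      · exact ⟨s, Or.inl h, h1, h2, h3⟩
      · exact ⟨s, Or.inr ⟨by omega, by omega⟩, h1, h2, h3⟩
    · omega
  · rintro ⟨s, hs, h1, h2, h3⟩
    exact ⟨s, Or.inl (by omega), h1, h2, h3⟩

theorem pvInv_nextRow (puzzle : List (List String)) (copy : List (List Int)) (R C i : Nat)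
    (cp : List (List Int)) (h : pvInv puzzle copy R C i C cp) :
    pvInv puzzle copy R C (i+1) 0 cp := by
  refine ⟨h.1, fun p hp q hq => ?_⟩
  obtain ⟨h1, h2⟩ := h.2 p hp q hq
  rw [pvZeroed_nextRow puzzle copy i C p q hq] at *
  exact ⟨h1, h2⟩

-- main inner-loop lemma: A's j-loop and B's j-loop produce the same emitted list,
-- and A's copy state keeps the invariant
theorem pvLoopJ (puzzle : List (List String)) (copy : List (List Int)) (R C i : Nat)
    (hHP : pvHP puzzle copy R C) (hiR : i < R) :
    ∀ fj j cp accA accB, j + fj = C → pvInv puzzle copy R C i j cp →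
      ∃ cp' L, aLoopJ puzzle R i j fj (cp, accA) = (cp', accA ++ L) ∧
        bLoopJ puzzle copy R i j fj accB = accB ++ L ∧
        pvInv puzzle copy R C i C cp' := by
  intro fj
  induction fj with
  | zero =>
    intro j cp accA accB hjC hinv
    have hjC0 : j = C := by omega
    subst hjC0
    exact ⟨cp, [], by simp [aLoopJ], by simp [bLoopJ], hinv⟩
  | succ fj ih =>
    intro j cp accA accB hjC hinv
    have hjC' : j < C := by omega
    by_cases hw : pvGetS puzzle i j = "*"
    · -- wall: both skip
      have hinv' : pvInv puzzle copy R C i (j+1) cp := by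
        refine ⟨hinv.1, fun p hp q hq => ?_⟩
        obtain ⟨h1, h2⟩ := hinv.2 p hp q hq
        rw [pvZeroed_wall puzzle copy i j p q (fun _ => hw)] at *
        exact ⟨h1, h2⟩
      obtain ⟨cp', L, hA, hB, hI⟩ := ih (j+1) cp accA accB (by omega) hinv'
      exact ⟨cp', L, by simpa [aLoopJ, if_pos (Or.inl hw)] using hA,
        by simpa [bLoopJ, if_pos (Or.inl hw)] using hB, hI⟩
    · by_cases hz : pvGetZ copy i j = 0
      · -- original cell zero: both skip
        have hcp0 : pvGetZ cp i j = 0 := by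
          obtain ⟨h1, h2⟩ := hinv.2 i hiR j hjC'
          by_cases hzd : pvZeroed puzzle copy i j i j
          · exact h1 hzd
          · rw [h2 hzd]; exact hz
        have hinv' : pvInv puzzle copy R C i (j+1) cp := by
          refine ⟨hinv.1, fun p hp q hq => ?_⟩
          obtain ⟨h1, h2⟩ := hinv.2 p hp q hq
          rw [pvZeroed_zero puzzle copy i j p q hz] at *
          exact ⟨h1, h2⟩
        obtain ⟨cp', L, hA, hB, hI⟩ := ih (j+1) cp accA accB (by omega) hinv'
        exact ⟨cp', L, by simpa [aLoopJ, if_pos (Or.inr hcp0)] using hA,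
          by simpa [bLoopJ, if_pos (Or.inr hz)] using hB, hI⟩
      · by_cases hcons : pvZeroed puzzle copy i j i j
        · -- consumed by an earlier start: A sees 0, B's scan says consumed
          have hcp0 : pvGetZ cp i j = 0 := (hinv.2 i hiR j hjC').1 hcons
          have hscan : bScan puzzle copy j i = true := by
            rw [bScan_iff]
            obtain ⟨s, hs, hsi, hnz, hnw⟩ := hcons
            rcases hs with hs | ⟨_, hq⟩
            · exact ⟨s, hs, hnz, fun k h1 h2 => hnw k h1 (by omega)⟩
            · omega
          have hinv' : pvInv puzzle copy R C i (j+1) cp := by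
            refine ⟨hinv.1, fun p hp q hq => ?_⟩
            obtain ⟨h1, h2⟩ := hinv.2 p hp q hq
            rw [pvZeroed_consumed puzzle copy i j p q hcons] at *
            exact ⟨h1, h2⟩
          obtain ⟨cp', L, hA, hB, hI⟩ := ih (j+1) cp accA accB (by omega) hinv'
          refine ⟨cp', L, by simpa [aLoopJ, if_pos (Or.inr hcp0)] using hA, ?_, hI⟩
          have hguardB : ¬ (pvGetS puzzle i j = "*" ∨ pvGetZ copy i j = 0) := by tauto
          simpa [bLoopJ, if_neg hguardB, hscan] using hB
        · -- start of a clue: both emit the same pair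
          have hcporig : pvGetZ cp i j = pvGetZ copy i j := (hinv.2 i hiR j hjC').2 hcons
          have hcpnz : pvGetZ cp i j ≠ 0 := by rwa [hcporig]
          have hguardA : ¬ (pvGetS puzzle i j = "*" ∨ pvGetZ cp i j = 0) := by tauto
          have hguardB : ¬ (pvGetS puzzle i j = "*" ∨ pvGetZ copy i j = 0) := by tauto
          have hscan : bScan puzzle copy j i = false := by
            cases hsb : bScan puzzle copy j i
            · rfl
            · exfalso
              obtain ⟨s, hsi, hnz, hnw⟩ := (bScan_iff puzzle copy j i).1 hsb
              refine hcons ⟨s, Or.inl hsi, by omega, hnz, fun k h1 h2 => ?_⟩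
              rcases Nat.lt_or_ge k i with h | h
              · exact hnw k h1 h
              · have hki : k = i := by omega
                subst hki; exact hw
          have hsnd : (aWalk puzzle j i (R - i) cp "").2 = bText puzzle j i (R - i) "" :=
            aWalk_snd puzzle j (R - i) i cp ""
          have hinv' : pvInv puzzle copy R C i (j+1) (aWalk puzzle j i (R - i) cp "").1 := by
            refine ⟨aWalk_fst_shape puzzle copy j (R - i) i cp "" hinv.1, fun p hp q hq => ?_⟩
            by_cases hnew : q = j ∧ i ≤ p ∧ pvNoWall puzzle j i p
            · have hq1 := hnew.1
              have hq2 := hnew.2.1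
              have hq3 := hnew.2.2
              rw [hq1]
              constructor
              · intro _
                exact aWalk_fst_zero puzzle copy R C j hHP hjC' (R - i) i cp "" p hinv.1
                  (by omega) hq2 (by omega) hq3
              · intro hnd
                exact absurd ((pvZeroed_start puzzle copy i j p j hz).2 (Or.inr ⟨rfl, hq2, hq3⟩)) hnd
            · have hkeep : pvGetZ (aWalk puzzle j i (R - i) cp "").1 p q = pvGetZ cp p q := by
                apply aWalk_fst_keep
                rintro ⟨h1, h2, h3, h4⟩
                exact hnew ⟨h1, h2, h4⟩
              obtain ⟨h1, h2⟩ := hinv.2 p hp q hq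
              constructor
              · intro hzd
                rcases (pvZeroed_start puzzle copy i j p q hz).1 hzd with hzd' | hne
                · rw [hkeep]; exact h1 hzd'
                · exact absurd hne hnew
              · intro hnd
                rw [hkeep]
                refine h2 (fun hzd => hnd ?_)
                exact (pvZeroed_start puzzle copy i j p q hz).2 (Or.inl hzd)
          obtain ⟨cp', L, hA, hB, hI⟩ := ih (j+1) (aWalk puzzle j i (R - i) cp "").1
            (accA ++ [(pvGetZ cp i j, (aWalk puzzle j i (R - i) cp "").2)])
            (accB ++ [(pvGetZ copy i j, bText puzzle j i (R - i) "")]) (by omega) hinv'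
          refine ⟨cp', (pvGetZ copy i j, bText puzzle j i (R - i) "") :: L, ?_, ?_, hI⟩
          · have hstep : aLoopJ puzzle R i j (fj+1) (cp, accA)
                = aLoopJ puzzle R i (j+1) fj ((aWalk puzzle j i (R - i) cp "").1,
                    accA ++ [(pvGetZ cp i j, (aWalk puzzle j i (R - i) cp "").2)]) := by
              simp [aLoopJ, if_neg hguardA]
            rw [hstep, hA, hcporig, hsnd]
            simp
          · have hstepB : bLoopJ puzzle copy R i j (fj+1) accB
                = bLoopJ puzzle copy R i (j+1) fj
                    (accB ++ [(pvGetZ copy i j, bText puzzle j i (R - i) "")]) := by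
              simp [bLoopJ, if_neg hguardB, hscan]
            rw [hstepB, hB]
            simp

theorem pvLoopI (puzzle : List (List String)) (copy : List (List Int)) (R C : Nat)
    (hHP : pvHP puzzle copy R C) :
    ∀ fi i cp accA accB, i + fi = R → pvInv puzzle copy R C i 0 cp →
      ∃ cp' L, aLoopI puzzle R C i fi (cp, accA) = (cp', accA ++ L) ∧
        bLoopI puzzle copy R C i fi accB = accB ++ L := by
  intro fi
  induction fi with
  | zero =>
    intro i cp accA accB _ _
    exact ⟨cp, [], by simp [aLoopI], by simp [bLoopI]⟩
  | succ fi ih =>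
    intro i cp accA accB hiR hinv
    obtain ⟨cp1, L1, hA1, hB1, hI1⟩ := pvLoopJ puzzle copy R C i hHP (by omega) C 0 cp accA accB
      (by omega) hinv
    obtain ⟨cp2, L2, hA2, hB2⟩ := ih (i+1) cp1 (accA ++ L1) (accB ++ L1) (by omega)
      (pvInv_nextRow puzzle copy R C i cp1 hI1)
    refine ⟨cp2, L1 ++ L2, ?_, ?_⟩
    · simp only [aLoopI, hA1, hA2, List.append_assoc]
    · simp only [bLoopI, hB1, hB2, List.append_assoc]

theorem pvInv_init (puzzle : List (List String)) (copy : List (List Int)) (R C : Nat) :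
    pvInv puzzle copy R C 0 0 copy := by
  refine ⟨⟨rfl, fun _ => rfl⟩, fun p _ q _ => ?_⟩
  constructor
  · rintro ⟨s, hs, _, _, _⟩
    omega
  · intro _; rfl

-- ===== VERDICT (by name: the statement is the Claim_ definition above) =====
theorem down1_spec : Claim_equal_down1 := by
  intro r c puzzle copy _ hpre
  unfold Spec_down1 down1 down1_alt
  have hHP : pvHP puzzle copy r.toNat c.toNat := by
    intro i hi j hj hw
    by_cases hc : 0 < c
    · exact ((hpre hc).2 i hi).2 j hj hw
    · have : c.toNat = 0 := by omega
      omega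
  obtain ⟨cp', L, hA, hB⟩ := pvLoopI puzzle copy r.toNat c.toNat hHP r.toNat 0 copy [] []
    (by omega) (pvInv_init puzzle copy r.toNat c.toNat)
  rw [hA, hB]
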